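-- pv_equiv track=rewrite | github.com/penglai-doll/UsefulSkills | android-malware-analysis/scripts/pipeline/manifest.py | find_manifest_entry
-- ===== SOURCE A (Python) =====
-- def find_manifest_entry(entry_names: list[str]) -> str | None:
--     normalized = [name.replace("\\", "/") for name in entry_names]
--     if "AndroidManifest.xml" in normalized:
--         return "AndroidManifest.xml"
--     preferred = [
--         "resources/AndroidManifest.xml",
--         "original/AndroidManifest.xml",
--     ]
--     for candidate in preferred:
--         if candidate in normalized:
--             return candidate
--     matches = [name for name in normalized if name.endswith("/AndroidManifest.xml")]
--     if not matches:
--         return None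
--     return sorted(matches, key=lambda item: (len(item.split("/")), len(item), item.lower()))[0]
-- ===== SOURCE B (Python) =====
-- def find_manifest_entry(entry_names: list[str]) -> str | None:
--     # one scoring pass: keep the first name with the lexicographically smallest priority key
--     best = None
--     for name in entry_names:
--         n = name.replace("\\", "/")
--         if n == "AndroidManifest.xml":
--             p = 0
--         elif n == "resources/AndroidManifest.xml":
--             p = 1
--         elif n == "original/AndroidManifest.xml":
--             p = 2
--         elif n.endswith("/AndroidManifest.xml"):
--             p = 3
--         else:
--             continue
--         key = (p, len(n.split("/")), len(n), n.lower())
--         if best is None or key < best[0]: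
--             best = (key, n)
--     return None if best is None else best[1]
-- ===== Notes on version B (the rewrite author's own statement) =====
-- stated objective: alternative
-- what changed: Replaces A's staged membership scans plus filter-and-sort with a single scoring pass that keeps the first name attaining the lexicographically minimal priority key.
import Mathlib
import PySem

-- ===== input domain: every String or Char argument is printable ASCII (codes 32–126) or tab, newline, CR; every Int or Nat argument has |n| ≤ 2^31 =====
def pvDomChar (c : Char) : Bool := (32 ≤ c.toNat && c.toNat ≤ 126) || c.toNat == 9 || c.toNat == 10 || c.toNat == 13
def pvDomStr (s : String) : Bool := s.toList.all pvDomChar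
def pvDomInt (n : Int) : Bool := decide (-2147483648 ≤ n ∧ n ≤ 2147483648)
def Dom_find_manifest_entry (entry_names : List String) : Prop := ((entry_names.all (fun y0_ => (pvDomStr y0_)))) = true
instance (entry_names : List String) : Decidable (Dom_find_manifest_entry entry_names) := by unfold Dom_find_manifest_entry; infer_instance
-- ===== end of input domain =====

-- B replaces A's staged membership scans plus filter-and-sort by a single scoring pass that
-- keeps the first name with the lexicographically minimal priority key (objective: alternative).

-- ===== PORT A =====
-- len(n.split("/")) — split with the nonempty separator "/" (PySem.Chars.splitOn is the sep ≠ "" form; exact)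
def pvSegs (n : String) : Nat := (PySem.Chars.splitOn n.toList ['/']).length

-- the sort key lambda: (len(item.split("/")), len(item), item.lower())
def pvAmKey (n : String) : Nat × Int × String := (pvSegs n, PySem.Str.len n, PySem.Str.lower n)

-- Python's '<' on such 3-tuples, written out by hand (lexicographic; exact — Python str '<'
-- is Lean String '<', see PYSEM.md)
def pvTupLt (a b : Nat × Int × String) : Bool :=
  decide (a.1 < b.1) ||
    (a.1 == b.1 && (decide (a.2.1 < b.2.1) || (a.2.1 == b.2.1 && decide (a.2.2 < b.2.2))))

def find_manifest_entry (entry_names : List String) : Option String :=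
  let normalized := entry_names.map (fun name => PySem.Str.replace name "\\" "/")
  if normalized.contains "AndroidManifest.xml" then some "AndroidManifest.xml"
  else
    match ["resources/AndroidManifest.xml", "original/AndroidManifest.xml"].find?
        (fun candidate => normalized.contains candidate) with
    | some candidate => some candidate
    | none =>
      let mts := normalized.filter (fun n => PySem.Str.endswith n "/AndroidManifest.xml")
      if mts.isEmpty then none
      else
        -- sorted(mts, key=…)[0]: PySem.List.sorted needs an LT key type, and the key here is a
        -- 3-tuple, so Python's stable insertion sort is written out by hand: it is exactly
        -- PySem.List.sorted's own form (sorted_eq_foldl_insertBy) with the tuple's '<' (pvTupLt)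
        match mts.foldl
            (fun acc x => PySem.List.insertBy (fun a b => pvTupLt (pvAmKey a) (pvAmKey b)) x acc)
            [] with
        | [] => none  -- unreachable: mts is nonempty
        | m :: _ => some m

-- ===== PORT B =====
-- the if/elif chain assigning the priority p (the final else's continue = none)
def pvPrio (n : String) : Option Nat :=
  if n = "AndroidManifest.xml" then some 0
  else if n = "resources/AndroidManifest.xml" then some 1
  else if n = "original/AndroidManifest.xml" then some 2
  else if PySem.Str.endswith n "/AndroidManifest.xml" then some 3
  else none

-- Python's '<' on the 4-tuple keys (p, segs, len, lower): lexicographic, first component then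
-- the remaining 3-tuple
def pvKeyLt (a b : Nat × (Nat × Int × String)) : Bool :=
  decide (a.1 < b.1) || (a.1 == b.1 && pvTupLt a.2 b.2)

-- the loop body: normalize, score, keep the strictly smaller key
def pvStep (best : Option ((Nat × (Nat × Int × String)) × String)) (name : String) :
    Option ((Nat × (Nat × Int × String)) × String) :=
  let n := PySem.Str.replace name "\\" "/"
  match pvPrio n with
  | none => best
  | some p =>
    let key := (p, (pvSegs n, PySem.Str.len n, PySem.Str.lower n))
    match best with
    | none => some (key, n)
    | some (bk, bn) => if pvKeyLt key bk then some (key, n) else some (bk, bn)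

def find_manifest_entry_alt (entry_names : List String) : Option String :=
  (entry_names.foldl pvStep none).map (fun b => b.2)

-- ===== PRECONDITION & SPEC =====
def Spec_find_manifest_entry (entry_names : List String) (out : Option String) : Prop := out = find_manifest_entry_alt entry_names
instance (entry_names : List String) (out : Option String) : Decidable (Spec_find_manifest_entry entry_names out) := by unfold Spec_find_manifest_entry; infer_instance

-- ===== CLAIM (what is proved, stated in full; the proofs are below) =====
def Claim_equal_find_manifest_entry : Prop := ∀ (entry_names : List String), Dom_find_manifest_entry entry_names → Spec_find_manifest_entry entry_names (find_manifest_entry entry_names)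

-- ===== LEMMAS AND PROOFS =====

-- proof-side abbreviations
def pvRepl (name : String) : String := PySem.Str.replace name "\\" "/"

def pvScore (n : String) : Option (Nat × (Nat × Int × String)) :=
  (pvPrio n).map (fun p => (p, pvAmKey n))

def pvNStep (best : Option ((Nat × (Nat × Int × String)) × String)) (n : String) :
    Option ((Nat × (Nat × Int × String)) × String) :=
  match pvScore n with
  | none => best
  | some k =>
    match best with
    | none => some (k, n)
    | some (bk, bn) => if pvKeyLt k bk then some (k, n) else some (bk, bn)

def pvABody (ms : List String) : Option String :=
  if ms.contains "AndroidManifest.xml" then some "AndroidManifest.xml"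
  else
    match ["resources/AndroidManifest.xml", "original/AndroidManifest.xml"].find?
        (fun candidate => ms.contains candidate) with
    | some candidate => some candidate
    | none =>
      let mts := ms.filter (fun n => PySem.Str.endswith n "/AndroidManifest.xml")
      if mts.isEmpty then none
      else
        match mts.foldl
            (fun acc x => PySem.List.insertBy (fun a b => pvTupLt (pvAmKey a) (pvAmKey b)) x acc)
            [] with
        | [] => none
        | m :: _ => some m

-- the Prop-side lexicographic embedding of the keys
def pvEmb (k : Nat × (Nat × Int × String)) : Nat ×ₗ Nat ×ₗ Int ×ₗ String :=
  toLex (k.1, toLex (k.2.1, toLex (k.2.2.1, k.2.2.2)))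

lemma pvKeyLt_iff (a b : Nat × (Nat × Int × String)) :
    pvKeyLt a b = true ↔ pvEmb a < pvEmb b := by
  rcases a with ⟨a1, a2, a3, a4⟩; rcases b with ⟨b1, b2, b3, b4⟩
  simp [pvKeyLt, pvTupLt, pvEmb, Prod.Lex.lt_iff]

lemma pvKeyLt_eq_false_iff (a b : Nat × (Nat × Int × String)) :
    pvKeyLt a b = false ↔ pvEmb b ≤ pvEmb a := by
  rw [Bool.eq_false_iff, Ne, pvKeyLt_iff, not_lt]

lemma pvA_eq (ns : List String) : find_manifest_entry ns = pvABody (ns.map pvRepl) := rfl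

lemma pvStep_eq (best : Option ((Nat × (Nat × Int × String)) × String)) (name : String) :
    pvStep best name = pvNStep best (pvRepl name) := by
  simp only [pvStep, pvNStep, pvScore, pvRepl, pvAmKey]
  cases h : pvPrio (PySem.Str.replace name "\\" "/") with
  | none => rfl
  | some p => rfl

lemma pvAlt_eq (ns : List String) :
    find_manifest_entry_alt ns = ((ns.map pvRepl).foldl pvNStep none).map (fun b => b.2) := by
  have hf : pvStep = fun acc y => pvNStep acc (pvRepl y) := by
    funext acc y; exact pvStep_eq acc y
  unfold find_manifest_entry_alt
  rw [List.foldl_map, hf]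

lemma pvFoldl_eq_none (ms : List String) (acc : Option ((Nat × (Nat × Int × String)) × String))
    (h : ms.foldl pvNStep acc = none) : acc = none ∧ ∀ n ∈ ms, pvScore n = none := by
  induction ms generalizing acc with
  | nil => exact ⟨h, by simp⟩
  | cons x t ih =>
    obtain ⟨hstep, ht⟩ := ih (pvNStep acc x) h
    have hax : acc = none ∧ pvScore x = none := by
      unfold pvNStep at hstep
      cases hsx : pvScore x with
      | none => simp [hsx] at hstep; exact ⟨hstep, rfl⟩
      | some k =>
        rw [hsx] at hstep
        cases acc with
        | none => simp at hstep
        | some b => rcases b with ⟨bk, bn⟩; simp at hstep; split at hstep <;> simp_all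
    refine ⟨hax.1, fun n hn => ?_⟩
    rcases List.mem_cons.mp hn with rfl | hn
    · exact hax.2
    · exact ht n hn

lemma pvFoldl_spec (ms : List String) :
    ∀ (acc : Option ((Nat × (Nat × Int × String)) × String)) k n,
      ms.foldl pvNStep acc = some (k, n) →
        (acc = some (k, n) ∨ (n ∈ ms ∧ pvScore n = some k)) ∧
        (∀ m ∈ ms, ∀ km, pvScore m = some km → pvEmb k ≤ pvEmb km) ∧
        (∀ k0 n0, acc = some (k0, n0) → pvEmb k ≤ pvEmb k0) := by
  induction ms with
  | nil =>
    intro acc k n h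
    simp at h
    refine ⟨Or.inl h, by simp, fun k0 n0 h0 => ?_⟩
    rw [h] at h0; cases h0; exact le_refl _
  | cons x t ih =>
    intro acc k n h
    obtain ⟨hprov, hmin, haccle⟩ := ih (pvNStep acc x) k n h
    -- step facts about pvNStep acc x
    have S1 : ∀ k' n', pvNStep acc x = some (k', n') →
        acc = some (k', n') ∨ (pvScore x = some k' ∧ n' = x) := by
      intro k' n' hs
      unfold pvNStep at hs
      cases hsx : pvScore x with
      | none => rw [hsx] at hs; exact Or.inl hs
      | some kx =>
        rw [hsx] at hs
        cases acc with
        | none =>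
          simp at hs
          exact Or.inr ⟨by simp [hs.1], hs.2.symm⟩
        | some b =>
          rcases b with ⟨bk, bn⟩
          by_cases hlt : pvKeyLt kx bk = true
          · simp [hlt] at hs
            exact Or.inr ⟨by simp [hs.1], hs.2.symm⟩
          · simp [hlt] at hs
            exact Or.inl (by rw [hs.1, hs.2])
    have S2 : ∀ kx, pvScore x = some kx →
        ∃ k' n', pvNStep acc x = some (k', n') ∧ pvEmb k' ≤ pvEmb kx := by
      intro kx hsx
      unfold pvNStep
      rw [hsx]
      cases acc with
      | none => exact ⟨kx, x, rfl, le_refl _⟩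
      | some b =>
        rcases b with ⟨bk, bn⟩
        by_cases hlt : pvKeyLt kx bk = true
        · exact ⟨kx, x, by simp [hlt], le_refl _⟩
        · have hle := (pvKeyLt_eq_false_iff kx bk).mp (Bool.eq_false_iff.mpr hlt)
          exact ⟨bk, bn, by simp [hlt], hle⟩
    have S3 : ∀ k0 n0, acc = some (k0, n0) →
        ∃ k' n', pvNStep acc x = some (k', n') ∧ pvEmb k' ≤ pvEmb k0 := by
      intro k0 n0 hacc
      subst hacc
      unfold pvNStep
      cases hsx : pvScore x with
      | none => exact ⟨k0, n0, rfl, le_refl _⟩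
      | some kx =>
        by_cases hlt : pvKeyLt kx k0 = true
        · exact ⟨kx, x, by simp [hlt], le_of_lt ((pvKeyLt_iff kx k0).mp hlt)⟩
        · exact ⟨k0, n0, by simp [hlt], le_refl _⟩
    refine ⟨?_, ?_, ?_⟩
    · rcases hprov with hacc' | ⟨hn, hs⟩
      · rcases S1 k n hacc' with h' | ⟨hs, rfl⟩
        · exact Or.inl h'
        · exact Or.inr ⟨by simp, hs⟩
      · exact Or.inr ⟨by simp [hn], hs⟩
    · intro m hm km hkm
      rcases List.mem_cons.mp hm with rfl | hm
      · obtain ⟨k', n', hs, hle⟩ := S2 km hkm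
        exact le_trans (haccle k' n' hs) hle
      · exact hmin m hm km hkm
    · intro k0 n0 hacc
      obtain ⟨k', n', hs, hle⟩ := S3 k0 n0 hacc
      exact le_trans (haccle k' n' hs) hle

lemma pvPrio_spec (n : String) (p : Nat) (h : pvPrio n = some p) :
    (p = 0 ∧ n = "AndroidManifest.xml") ∨
    (p = 1 ∧ n = "resources/AndroidManifest.xml") ∨
    (p = 2 ∧ n = "original/AndroidManifest.xml") ∨
    (p = 3 ∧ PySem.Str.endswith n "/AndroidManifest.xml" = true) := by
  unfold pvPrio at h
  split_ifs at h <;> simp_all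

lemma pvScore_fst (n : String) (k : Nat × (Nat × Int × String)) (h : pvScore n = some k) :
    pvPrio n = some k.1 := by
  unfold pvScore at h
  cases hp : pvPrio n with
  | none => rw [hp] at h; simp at h
  | some p => rw [hp] at h; simp at h; cases h; simp

lemma pvHead_insertBy (bef : String → String → Bool) (x : String) (l : List String) :
    (PySem.List.insertBy bef x l).head? =
      some (match l with | [] => x | a :: _ => if bef x a then x else a) := by
  cases l with
  | nil => rfl
  | cons a t =>
    rw [PySem.List.insertBy]
    split <;> simp [*]

def pvRel (op : Option ((Nat × (Nat × Int × String)) × String)) (os : Option String) : Prop :=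
  match op, os with
  | none, none => True
  | some (k, n), some n' => n' = n ∧ k = (3, pvAmKey n)
  | _, _ => False

lemma pvSort_fold_rel (l : List String) :
    ∀ (_ : ∀ n ∈ l, pvScore n = some (3, pvAmKey n))
      (accP : Option ((Nat × (Nat × Int × String)) × String)) (accL : List String),
      pvRel accP accL.head? →
      pvRel (l.foldl pvNStep accP)
        ((l.foldl (fun acc x =>
            PySem.List.insertBy (fun a b => pvTupLt (pvAmKey a) (pvAmKey b)) x acc) accL).head?) := by
  induction l with
  | nil => intro _ accP accL h; exact h
  | cons x t ih =>
    intro hl accP accL h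
    have hx : pvScore x = some (3, pvAmKey x) := hl x (by simp)
    have ht : ∀ n ∈ t, pvScore n = some (3, pvAmKey n) := fun n hn => hl n (by simp [hn])
    simp only [List.foldl_cons]
    refine ih ht (pvNStep accP x) _ ?_
    rw [pvHead_insertBy]
    cases accP with
    | none =>
      cases accL with
      | nil =>
        simp only [pvNStep, hx]
        exact ⟨rfl, rfl⟩
      | cons a t' => exact absurd h (by simp [pvRel])
    | some b =>
      rcases b with ⟨bk, bn⟩
      cases accL with
      | nil => exact absurd h (by simp [pvRel])
      | cons a t' =>
        obtain ⟨ha, hbk⟩ : a = bn ∧ bk = (3, pvAmKey bn) := h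
        subst hbk; subst ha
        have hkey : pvKeyLt (3, pvAmKey x) (3, pvAmKey a) = pvTupLt (pvAmKey x) (pvAmKey a) := by
          simp [pvKeyLt]
        simp only [pvNStep, hx, hkey]
        by_cases hc : pvTupLt (pvAmKey x) (pvAmKey a) = true
        · simp only [hc, if_true]
          exact ⟨rfl, rfl⟩
        · have hcf := Bool.eq_false_iff.mpr hc
          simp only [hcf, Bool.false_eq_true, if_false]
          exact ⟨rfl, rfl⟩

lemma pvFoldl_filter (ms : List String)
    (hAM : "AndroidManifest.xml" ∉ ms)
    (hres : "resources/AndroidManifest.xml" ∉ ms)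
    (horig : "original/AndroidManifest.xml" ∉ ms) :
    ∀ acc, ms.foldl pvNStep acc =
      (ms.filter (fun n => PySem.Str.endswith n "/AndroidManifest.xml")).foldl pvNStep acc := by
  induction ms with
  | nil => intro acc; rfl
  | cons x t ih =>
    have hAM' : "AndroidManifest.xml" ∉ t := fun hh => hAM (by simp [hh])
    have hres' : "resources/AndroidManifest.xml" ∉ t := fun hh => hres (by simp [hh])
    have horig' : "original/AndroidManifest.xml" ∉ t := fun hh => horig (by simp [hh])
    intro acc
    by_cases he : PySem.Str.endswith x "/AndroidManifest.xml" = true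
    · simp only [List.filter_cons, he, if_true, List.foldl_cons]
      exact ih hAM' hres' horig' (pvNStep acc x)
    · have heb := Bool.eq_false_iff.mpr he
      have hx : pvScore x = none := by
        have h1 : x ≠ "AndroidManifest.xml" := fun hh => hAM (by simp [hh])
        have h2 : x ≠ "resources/AndroidManifest.xml" := fun hh => hres (by simp [hh])
        have h3 : x ≠ "original/AndroidManifest.xml" := fun hh => horig (by simp [hh])
        simp only [pvScore, pvPrio, if_neg h1, if_neg h2, if_neg h3, heb,
          Bool.false_eq_true, if_false]
        rfl
      simp only [List.filter_cons, heb, Bool.false_eq_true, if_false, List.foldl_cons]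
      simp only [pvNStep, hx]
      exact ih hAM' hres' horig' acc

lemma pvEmb_le_fst (k km : Nat × (Nat × Int × String)) (h : pvEmb k ≤ pvEmb km) :
    k.1 ≤ km.1 := by
  unfold pvEmb at h
  rcases Prod.Lex.le_iff.mp h with h | ⟨h, -⟩ <;> simp only [ofLex_toLex] at h <;> omega

-- the result of the scoring fold when a priority-p exact name is present and no
-- better-priority exact name is: shared engine for the first three cases of pvMain
lemma pvFold_exact (ms : List String) (w : String) (pw : Nat)
    (hw : w ∈ ms) (hsw : pvScore w = some (pw, pvAmKey w))
    (huniq : ∀ n ∈ ms, ∀ p, pvPrio n = some p → p ≤ pw → n = w) :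
    (ms.foldl pvNStep none).map (fun b => b.2) = some w := by
  cases hr : ms.foldl pvNStep none with
  | none =>
    exfalso
    obtain ⟨-, hall⟩ := pvFoldl_eq_none ms none hr
    rw [hall w hw] at hsw
    exact absurd hsw (by simp)
  | some b =>
    rcases b with ⟨k, n⟩
    obtain ⟨hprov, hmin, -⟩ := pvFoldl_spec ms none k n hr
    rcases hprov with h | ⟨hn, hsn⟩
    · exact absurd h (by simp)
    · have hle : k.1 ≤ pw := pvEmb_le_fst _ _ (hmin _ hw _ hsw)
      have hp := pvScore_fst n k hsn
      simp [huniq n hn k.1 hp hle]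

lemma pvMain (ms : List String) : pvABody ms = (ms.foldl pvNStep none).map (fun b => b.2) := by
  by_cases h1 : ms.contains "AndroidManifest.xml" = true
  · -- case 1: "AndroidManifest.xml" is present
    have hmem : "AndroidManifest.xml" ∈ ms := by simpa using h1
    rw [pvFold_exact ms "AndroidManifest.xml" 0 hmem rfl ?uniq]
    · unfold pvABody
      rw [if_pos h1]
    case uniq =>
      intro n _ p hp hple
      interval_cases p
      rcases pvPrio_spec n 0 hp with ⟨-, rfl⟩ | ⟨h, -⟩ | ⟨h, -⟩ | ⟨h, -⟩ <;> first | rfl | omega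
  · have hb1 := Bool.eq_false_iff.mpr h1
    have hAM : "AndroidManifest.xml" ∉ ms := by simpa using hb1
    by_cases h2 : ms.contains "resources/AndroidManifest.xml" = true
    · -- case 2: "resources/AndroidManifest.xml" is present
      have hmem : "resources/AndroidManifest.xml" ∈ ms := by simpa using h2
      rw [pvFold_exact ms "resources/AndroidManifest.xml" 1 hmem rfl ?uniq]
      · unfold pvABody
        rw [if_neg h1]
        simp only [List.find?, h2]
      case uniq =>
        intro n hn p hp hple
        interval_cases p <;>
          rcases pvPrio_spec n _ hp with ⟨-, rfl⟩ | ⟨h, rfl⟩ | ⟨h, -⟩ | ⟨h, -⟩ <;>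
            first | rfl | omega | exact absurd hn hAM
    · have hb2 := Bool.eq_false_iff.mpr h2
      have hres : "resources/AndroidManifest.xml" ∉ ms := by simpa using hb2
      by_cases h3 : ms.contains "original/AndroidManifest.xml" = true
      · -- case 3: "original/AndroidManifest.xml" is present
        have hmem : "original/AndroidManifest.xml" ∈ ms := by simpa using h3
        rw [pvFold_exact ms "original/AndroidManifest.xml" 2 hmem rfl ?uniq]
        · unfold pvABody
          rw [if_neg h1]
          simp only [List.find?, hb2, h3]
        case uniq =>
          intro n hn p hp hple
          interval_cases p <;>
            rcases pvPrio_spec n _ hp with ⟨-, rfl⟩ | ⟨h, rfl⟩ | ⟨h, rfl⟩ | ⟨h, -⟩ <;>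
              first | rfl | omega | exact absurd hn hAM | exact absurd hn hres
      · -- case 4: only suffix matches remain
        have hb3 := Bool.eq_false_iff.mpr h3
        have horig : "original/AndroidManifest.xml" ∉ ms := by simpa using hb3
        rw [pvFoldl_filter ms hAM hres horig none]
        have hl : ∀ n ∈ ms.filter (fun n => PySem.Str.endswith n "/AndroidManifest.xml"),
            pvScore n = some (3, pvAmKey n) := by
          intro n hn
          obtain ⟨hnm, hne⟩ := List.mem_filter.mp hn
          have e1 : n ≠ "AndroidManifest.xml" := fun hh => hAM (hh ▸ hnm)
          have e2 : n ≠ "resources/AndroidManifest.xml" := fun hh => hres (hh ▸ hnm)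
          have e3 : n ≠ "original/AndroidManifest.xml" := fun hh => horig (hh ▸ hnm)
          simp only [pvScore, pvPrio, if_neg e1, if_neg e2, if_neg e3, hne, if_true]
          rfl
        have hrel := pvSort_fold_rel _ hl none [] trivial
        unfold pvABody
        rw [if_neg h1]
        simp only [List.find?, hb2, hb3]
        cases hop : (ms.filter (fun n => PySem.Str.endswith n "/AndroidManifest.xml")).foldl
            pvNStep none with
        | none =>
          rw [hop] at hrel
          cases hos : ((ms.filter
              (fun n => PySem.Str.endswith n "/AndroidManifest.xml")).foldl
              (fun acc x =>
                PySem.List.insertBy (fun a b => pvTupLt (pvAmKey a) (pvAmKey b)) x acc) []) with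
          | nil => rw [hos] at hrel; split <;> rfl
          | cons m t => rw [hos] at hrel; exact absurd hrel (by simp [pvRel])
        | some b =>
          rcases b with ⟨k, n⟩
          rw [hop] at hrel
          cases hos : ((ms.filter
              (fun n => PySem.Str.endswith n "/AndroidManifest.xml")).foldl
              (fun acc x =>
                PySem.List.insertBy (fun a b => pvTupLt (pvAmKey a) (pvAmKey b)) x acc) []) with
          | nil => rw [hos] at hrel; exact absurd hrel (by simp [pvRel])
          | cons m t =>
            rw [hos] at hrel
            obtain ⟨rfl, -⟩ : m = n ∧ k = (3, pvAmKey n) := hrel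
            have hne : (ms.filter
                (fun n => PySem.Str.endswith n "/AndroidManifest.xml")).isEmpty = false := by
              cases hmt : ms.filter (fun n => PySem.Str.endswith n "/AndroidManifest.xml") with
              | nil => rw [hmt] at hos; exact absurd hos (by simp)
              | cons y ys => simp
            rw [hne]
            simp

-- ===== VERDICT (by name: the statement is the Claim_ definition above) =====
theorem find_manifest_entry_spec : Claim_equal_find_manifest_entry := by
  intro ns _
  show find_manifest_entry ns = find_manifest_entry_alt ns
  rw [pvA_eq, pvAlt_eq, pvMain]
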